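-- pv_equiv track=rewrite | github.com/ken-maeda/regVariableConversion | rvc/app.py | _key2ind
-- ===== SOURCE A (Python) =====
-- def _key2ind(key):
--     """ key is converted the name human can recognize easily.
--
--     Args:
--         key (str): [ex] "3394"
--
--     Returns:
--         list: [ex] ['X3', 'X3', 'logX/X', 'logX']
--     """
--     result = [s.replace('1', 'X') for s in key]
--     result = [s.replace('2', 'X2') for s in result]
--     result = [s.replace('3', 'X3') for s in result]
--     result = [s.replace('4', 'logX') for s in result]
--     result = [s.replace('5', '1/X') for s in result]
--     result = [s.replace('6', '√X') for s in result]
--     result = [s.replace('7', 'X_logX') for s in result]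
--     result = [s.replace('8', 'X2_logX') for s in result]
--     result = [s.replace('9', 'logX/X') for s in result]
--     result = [s.replace('a', '1/X2') for s in result]
--     result = [s.replace('b', 'X√X') for s in result]
--     result = [s.replace('c', '√logx') for s in result]
--     result = [s.replace('d', '√XlogX') for s in result]
--     return result
-- ===== SOURCE B (Python) =====
-- _TABLE = {
--     '1': 'X', '2': 'X2', '3': 'X3', '4': 'logX', '5': '1/X', '6': '√X',
--     '7': 'X_logX', '8': 'X2_logX', '9': 'logX/X', 'a': '1/X2', 'b': 'X√X',
--     'c': '√logx', 'd': '√XlogX',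
-- }
--
-- def _key2ind(key):
--     return [_TABLE.get(c, c) for c in key]
-- ===== Notes on version B (the rewrite author's own statement) =====
-- stated objective: simpler
-- what changed: Replaced thirteen sequential full-list str.replace comprehensions with a single static translation table looked up once per character in one pass.
import Mathlib
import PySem

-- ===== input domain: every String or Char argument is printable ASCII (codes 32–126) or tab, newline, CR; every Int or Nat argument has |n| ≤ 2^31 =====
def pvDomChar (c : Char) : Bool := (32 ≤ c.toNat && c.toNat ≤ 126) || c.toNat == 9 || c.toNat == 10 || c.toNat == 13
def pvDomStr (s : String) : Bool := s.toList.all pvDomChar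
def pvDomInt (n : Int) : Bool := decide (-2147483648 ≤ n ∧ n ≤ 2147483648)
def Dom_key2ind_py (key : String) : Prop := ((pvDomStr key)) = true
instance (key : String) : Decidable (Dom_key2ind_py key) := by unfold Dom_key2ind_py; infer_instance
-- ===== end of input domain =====

-- B replaces A's thirteen sequential full-list str.replace passes with a single
-- static translation table looked up once per character (objective: simpler).

-- ===== PORT A =====
def key2ind_py (key : String) : List String :=
  let result := key.toList.map (fun s => PySem.Str.replace (String.ofList [s]) "1" "X")
  let result := result.map (fun s => PySem.Str.replace s "2" "X2")
  let result := result.map (fun s => PySem.Str.replace s "3" "X3")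
  let result := result.map (fun s => PySem.Str.replace s "4" "logX")
  let result := result.map (fun s => PySem.Str.replace s "5" "1/X")
  let result := result.map (fun s => PySem.Str.replace s "6" "√X")
  let result := result.map (fun s => PySem.Str.replace s "7" "X_logX")
  let result := result.map (fun s => PySem.Str.replace s "8" "X2_logX")
  let result := result.map (fun s => PySem.Str.replace s "9" "logX/X")
  let result := result.map (fun s => PySem.Str.replace s "a" "1/X2")
  let result := result.map (fun s => PySem.Str.replace s "b" "X√X")
  let result := result.map (fun s => PySem.Str.replace s "c" "√logx")
  let result := result.map (fun s => PySem.Str.replace s "d" "√XlogX")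
  result

-- ===== PORT B =====
def key2indTable : PySem.Dict Char String :=
  PySem.Dict.ofList
  [('1', "X"), ('2', "X2"), ('3', "X3"), ('4', "logX"), ('5', "1/X"), ('6', "√X"),
   ('7', "X_logX"), ('8', "X2_logX"), ('9', "logX/X"), ('a', "1/X2"), ('b', "X√X"),
   ('c', "√logx"), ('d', "√XlogX")]

def key2ind_py_alt (key : String) : List String :=
  key.toList.map (fun c => (PySem.Dict.get? key2indTable c).getD (String.ofList [c]))

-- ===== PRECONDITION & SPEC =====
def Spec_key2ind_py (key : String) (out : List String) : Prop := out = key2ind_py_alt key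
instance (key : String) (out : List String) : Decidable (Spec_key2ind_py key out) := by unfold Spec_key2ind_py; infer_instance

-- ===== CLAIM (what is proved, stated in full; the proofs are below) =====
def Claim_equal_key2ind_py : Prop := ∀ (key : String), Dom_key2ind_py key → Spec_key2ind_py key (key2ind_py key)

-- ===== LEMMAS AND PROOFS =====
-- A's thirteen-stage replace chain on a single character agrees with B's table lookup,
-- for every character in the domain (checked over all 128 candidate code points).
set_option maxRecDepth 4000 in
lemma key2ind_perChar : ∀ n ∈ List.range 128, pvDomChar (Char.ofNat n) = true →
    PySem.Str.replace (PySem.Str.replace (PySem.Str.replace (PySem.Str.replace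
    (PySem.Str.replace (PySem.Str.replace (PySem.Str.replace (PySem.Str.replace
    (PySem.Str.replace (PySem.Str.replace (PySem.Str.replace (PySem.Str.replace
    (PySem.Str.replace (String.ofList [Char.ofNat n]) "1" "X") "2" "X2") "3" "X3")
    "4" "logX") "5" "1/X") "6" "√X") "7" "X_logX") "8" "X2_logX") "9" "logX/X")
    "a" "1/X2") "b" "X√X") "c" "√logx") "d" "√XlogX"
    = (PySem.Dict.get? key2indTable (Char.ofNat n)).getD (String.ofList [Char.ofNat n]) := by
  decide

lemma key2ind_perChar' (c : Char) (h : pvDomChar c = true) :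
    PySem.Str.replace (PySem.Str.replace (PySem.Str.replace (PySem.Str.replace
    (PySem.Str.replace (PySem.Str.replace (PySem.Str.replace (PySem.Str.replace
    (PySem.Str.replace (PySem.Str.replace (PySem.Str.replace (PySem.Str.replace
    (PySem.Str.replace (String.ofList [c]) "1" "X") "2" "X2") "3" "X3")
    "4" "logX") "5" "1/X") "6" "√X") "7" "X_logX") "8" "X2_logX") "9" "logX/X")
    "a" "1/X2") "b" "X√X") "c" "√logx") "d" "√XlogX"
    = (PySem.Dict.get? key2indTable c).getD (String.ofList [c]) := by
  have hlt : c.toNat ∈ List.range 128 := by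
    simp [pvDomChar] at h
    simp only [List.mem_range]
    omega
  have := key2ind_perChar c.toNat hlt
  rw [Char.ofNat_toNat] at this
  exact this h

-- ===== VERDICT (by name: the statement is the Claim_ definition above) =====
theorem key2ind_py_spec : Claim_equal_key2ind_py := by
  intro key hdom
  unfold Spec_key2ind_py key2ind_py key2ind_py_alt
  simp only [List.map_map]
  apply List.map_congr_left
  intro c hc
  have hd : pvDomChar c = true := by
    have : key.toList.all pvDomChar = true := hdom
    exact List.all_eq_true.mp this c hc
  simpa using key2ind_perChar' c hd
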